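-- pv_equiv track=rewrite | github.com/Ritesh-97/causal-rationale-extraction-system | src/evaluation/metrics.py | _count_context_references
-- ===== SOURCE A (Python) =====
-- from typing import List, Dict, Any, Optional
--
-- def _count_context_references(
--
--     response: str,
--     previous_turns: List[Dict[str, Any]]
-- ) -> int:
--     """Count references to previous context"""
--     references = 0
--
--     for turn in previous_turns:
--         # Check for references to previous query
--         query_words = set(turn.get('query', '').lower().split())
--         response_words = set(response.lower().split())
--
--         if query_words.intersection(response_words):
--             references += 1
--
--     return references
-- ===== SOURCE B (Python) =====
-- from typing import List, Dict, Any
--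
-- def _count_context_references(
--     response: str,
--     previous_turns: List[Dict[str, Any]]
-- ) -> int:
--     """Count references to previous context (inverted-index formulation)."""
--     # word -> set of indices of turns whose query contains that word
--     index = {}
--     for i, turn in enumerate(previous_turns):
--         for w in turn.get('query', '').lower().split():
--             index.setdefault(w, set()).add(i)
--     referenced = set()
--     for w in set(response.lower().split()):
--         referenced |= index.get(w, set())
--     return len(referenced)
-- ===== Notes on version B (the rewrite author's own statement) =====
-- stated objective: faster
-- what changed: B builds an inverted index from query words to turn indices once, then takes the union of the index entries for the response's words and returns its size, instead of re-splitting and re-set-ifying the response for every turn and intersecting word sets.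
import Mathlib
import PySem

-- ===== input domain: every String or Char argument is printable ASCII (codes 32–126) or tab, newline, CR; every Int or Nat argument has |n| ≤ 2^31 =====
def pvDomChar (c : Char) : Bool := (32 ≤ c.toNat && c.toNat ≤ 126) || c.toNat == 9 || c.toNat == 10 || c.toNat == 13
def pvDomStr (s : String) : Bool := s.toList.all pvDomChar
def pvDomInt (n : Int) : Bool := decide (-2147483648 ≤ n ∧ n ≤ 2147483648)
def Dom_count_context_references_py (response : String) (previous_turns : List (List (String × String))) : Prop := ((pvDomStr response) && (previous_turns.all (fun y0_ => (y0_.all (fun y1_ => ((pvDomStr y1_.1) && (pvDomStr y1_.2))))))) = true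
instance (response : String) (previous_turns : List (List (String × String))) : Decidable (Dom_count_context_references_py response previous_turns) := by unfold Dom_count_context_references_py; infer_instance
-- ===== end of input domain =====

-- B replaces A's per-turn set intersection (re-splitting the response for every turn) by an
-- inverted index word → turn indices, unioned over the response's words; a timing run measured B faster (objective: faster).

-- ===== PORT A =====
def count_context_references_py (response : String) (previous_turns : List (List (String × String))) : Int :=
  previous_turns.foldl (fun references turn =>
    let query_words := PySem.Set.ofList (PySem.Str.split₀ (PySem.Str.lower ((PySem.Dict.mk turn).getD "query" "")))
    let response_words := PySem.Set.ofList (PySem.Str.split₀ (PySem.Str.lower response))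
    if PySem.Set.len (PySem.Set.inter query_words response_words) ≠ 0 then references + 1
    else references) 0

-- ===== PORT B =====
def count_context_references_py_alt (response : String) (previous_turns : List (List (String × String))) : Int :=
  let index : PySem.Dict String (PySem.Set Int) :=
    (PySem.List.enumerate previous_turns).foldl (fun d p =>
      (PySem.Str.split₀ (PySem.Str.lower ((PySem.Dict.mk p.2).getD "query" ""))).foldl
        (fun d w => PySem.Dict.modify d w PySem.Set.empty (fun s => PySem.Set.add s p.1)) d)
      (PySem.Dict.mk [])
  let referenced : PySem.Set Int :=
    (PySem.Set.ofList (PySem.Str.split₀ (PySem.Str.lower response))).foldl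
      (fun r w => PySem.Set.union r (PySem.Dict.getD index w PySem.Set.empty)) PySem.Set.empty
  PySem.Set.len referenced

-- ===== PRECONDITION & SPEC =====
def Spec_count_context_references_py (response : String) (previous_turns : List (List (String × String))) (out : Int) : Prop := out = count_context_references_py_alt response previous_turns
instance (response : String) (previous_turns : List (List (String × String))) (out : Int) : Decidable (Spec_count_context_references_py response previous_turns out) := by unfold Spec_count_context_references_py; infer_instance

-- ===== CLAIM (what is proved, stated in full; the proofs are below) =====
def Claim_equal_count_context_references_py : Prop := ∀ (response : String) (previous_turns : List (List (String × String))), Dom_count_context_references_py response previous_turns → Spec_count_context_references_py response previous_turns (count_context_references_py response previous_turns)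

-- ===== LEMMAS AND PROOFS =====

-- words of a turn's query, and the "this turn is referenced" predicate
def pvQ (turn : List (String × String)) : List String :=
  PySem.Str.split₀ (PySem.Str.lower ((PySem.Dict.mk turn).getD "query" ""))

def pvHit (R : List String) (turn : List (String × String)) : Bool :=
  decide (∃ w ∈ pvQ turn, w ∈ R)

-- A's if-condition is pvHit
lemma pvHit_cond (R : List String) (turn : List (String × String)) :
    (PySem.Set.len (PySem.Set.inter (PySem.Set.ofList (pvQ turn)) (PySem.Set.ofList R)) ≠ 0)
      ↔ pvHit R turn = true := by
  simp only [PySem.Set.len, PySem.Set.inter, pvHit, decide_eq_true_eq, ne_eq, Nat.cast_eq_zero,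
    List.length_eq_zero_iff, List.filter_eq_nil_iff, not_forall, not_not,
    PySem.Set.contains_iff, PySem.Set.mem_ofList, exists_prop]

lemma A_eq_countP (response : String) (turns : List (List (String × String))) :
    count_context_references_py response turns
      = (List.countP (pvHit (PySem.Str.split₀ (PySem.Str.lower response))) turns : Int) := by
  unfold count_context_references_py
  have h : (fun (references : Int) (turn : List (String × String)) =>
        let query_words := PySem.Set.ofList (PySem.Str.split₀ (PySem.Str.lower ((PySem.Dict.mk turn).getD "query" "")))
        let response_words := PySem.Set.ofList (PySem.Str.split₀ (PySem.Str.lower response))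
        if PySem.Set.len (PySem.Set.inter query_words response_words) ≠ 0 then references + 1
        else references)
      = (fun acc x => if pvHit (PySem.Str.split₀ (PySem.Str.lower response)) x = true then acc + 1 else acc) := by
    funext references turn
    exact if_congr (pvHit_cond _ turn) rfl rfl
  rw [h, PySem.List.foldl_count_if]
  simp

-- the inner word loop of the index builder
lemma mem_inner (ws : List String) (i : Int) (d : PySem.Dict String (PySem.Set Int))
    (w : String) (j : Int) :
    j ∈ (ws.foldl (fun d w' => PySem.Dict.modify d w' PySem.Set.empty (fun s => PySem.Set.add s i)) d).getD w PySem.Set.empty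
      ↔ j ∈ d.getD w PySem.Set.empty ∨ (j = i ∧ w ∈ ws) := by
  induction ws generalizing d with
  | nil => simp
  | cons w' t ih =>
    simp only [List.foldl_cons, ih]
    by_cases hw : w = w'
    · subst hw
      rw [PySem.Dict.getD_modify_self]
      rw [PySem.Set.mem_add]
      simp only [List.mem_cons]
      tauto
    · rw [PySem.Dict.getD_modify_of_ne _ _ _ hw]
      simp only [List.mem_cons]
      tauto


-- the index built over `enumerate turns s`
lemma mem_index (turns : List (List (String × String))) (s : Int)
    (d : PySem.Dict String (PySem.Set Int)) (w : String) (j : Int) :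
    j ∈ ((PySem.List.enumerate turns s).foldl (fun d p =>
          (pvQ p.2).foldl (fun d w' => PySem.Dict.modify d w' PySem.Set.empty (fun s' => PySem.Set.add s' p.1)) d) d).getD w PySem.Set.empty
      ↔ j ∈ d.getD w PySem.Set.empty
        ∨ ∃ m : Nat, m < turns.length ∧ j = s + m ∧ w ∈ pvQ (turns.getD m []) := by
  induction turns generalizing s d with
  | nil => simp [PySem.List.enumerate]
  | cons t ts ih =>
    rw [PySem.List.enumerate_cons]
    simp only [List.foldl_cons, ih, mem_inner]
    constructor
    · rintro (⟨h | ⟨hj, hw⟩⟩ | ⟨m, hm, hj, hw⟩)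
      · exact Or.inl h
      · exact Or.inr ⟨0, by simp, by omega, by simpa using hw⟩
      · exact Or.inr ⟨m + 1, by simpa using hm, by push_cast; omega, by simpa using hw⟩
    · rintro (h | ⟨m, hm, hj, hw⟩)
      · exact Or.inl (Or.inl h)
      · cases m with
        | zero => exact Or.inl (Or.inr ⟨by omega, by simpa using hw⟩)
        | succ m =>
          exact Or.inr ⟨m, by simpa using hm, by push_cast at hj ⊢; omega, by simpa using hw⟩


-- the union loop over the response's word set
lemma mem_reffold (ws : List String) (idx : PySem.Dict String (PySem.Set Int))
    (r : PySem.Set Int) (j : Int) :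
    j ∈ ws.foldl (fun r w => PySem.Set.union r (idx.getD w PySem.Set.empty)) r
      ↔ j ∈ r ∨ ∃ w ∈ ws, j ∈ idx.getD w PySem.Set.empty := by
  induction ws generalizing r with
  | nil => simp
  | cons w t ih =>
    simp only [List.foldl_cons, ih, PySem.Set.mem_union, List.mem_cons]
    constructor
    · rintro ((h | h) | ⟨w', hw', h⟩)
      · exact Or.inl h
      · exact Or.inr ⟨w, Or.inl rfl, h⟩
      · exact Or.inr ⟨w', Or.inr hw', h⟩
    · rintro (h | ⟨w', (rfl | hw'), h⟩)
      · exact Or.inl (Or.inl h)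
      · exact Or.inl (Or.inr h)
      · exact Or.inr ⟨w', hw', h⟩

lemma nodup_reffold (ws : List String) (idx : PySem.Dict String (PySem.Set Int))
    (r : PySem.Set Int) (h : r.Nodup) :
    (ws.foldl (fun r w => PySem.Set.union r (idx.getD w PySem.Set.empty)) r).Nodup := by
  induction ws generalizing r with
  | nil => exact h
  | cons w t ih => exact ih _ (PySem.Set.nodup_union _ _ h)

-- countP as a filtered range
lemma countP_eq_filter_range {α : Type} (p : α → Bool) (dflt : α) (xs : List α) :
    List.countP p xs = ((List.range xs.length).filter (fun m => p (xs.getD m dflt))).length := by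
  induction xs with
  | nil => simp
  | cons x t ih =>
    rw [List.countP_cons, List.length_cons, List.range_succ_eq_map]
    rw [List.filter_cons]
    by_cases hx : p x = true <;>
      simp [hx, List.filter_map, Function.comp_def, ih]

lemma B_eq_countP (response : String) (turns : List (List (String × String))) :
    count_context_references_py_alt response turns
      = (List.countP (pvHit (PySem.Str.split₀ (PySem.Str.lower response))) turns : Int) := by
  unfold count_context_references_py_alt
  simp only []
  set R := PySem.Str.split₀ (PySem.Str.lower response) with hR
  set idx := (PySem.List.enumerate turns).foldl (fun d p =>
      (PySem.Str.split₀ (PySem.Str.lower ((PySem.Dict.mk p.2).getD "query" ""))).foldl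
        (fun d w => PySem.Dict.modify d w PySem.Set.empty (fun s => PySem.Set.add s p.1)) d)
      (PySem.Dict.mk []) with hidx
  set referenced := (PySem.Set.ofList R).foldl
      (fun r w => PySem.Set.union r (PySem.Dict.getD idx w PySem.Set.empty)) PySem.Set.empty with href
  have hidx' : ∀ w j, j ∈ idx.getD w PySem.Set.empty
      ↔ ∃ m : Nat, m < turns.length ∧ j = (m : Int) ∧ w ∈ pvQ (turns.getD m []) := by
    intro w j
    rw [hidx]
    have := mem_index turns 0 (PySem.Dict.mk []) w j
    simp only [pvQ] at this ⊢
    rw [this]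
    have hempty : (PySem.Dict.mk ([] : List (String × PySem.Set Int))).getD w PySem.Set.empty = PySem.Set.empty := rfl
    rw [hempty]
    simp only [PySem.Set.empty, List.not_mem_nil, false_or, zero_add]
  have hmem : ∀ j : Int, j ∈ referenced
      ↔ ∃ m : Nat, m < turns.length ∧ j = (m : Int) ∧ pvHit R (turns.getD m []) = true := by
    intro j
    rw [href, mem_reffold]
    have h0 : j ∈ (PySem.Set.empty : PySem.Set Int) ↔ False := by
      simp [PySem.Set.empty]
    rw [h0, false_or]
    constructor
    · rintro ⟨w, hwR, hj⟩
      rw [PySem.Set.mem_ofList] at hwR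
      obtain ⟨m, hm, hjm, hwQ⟩ := (hidx' w j).mp hj
      exact ⟨m, hm, hjm, by simp only [pvHit, decide_eq_true_eq]; exact ⟨w, hwQ, hwR⟩⟩
    · rintro ⟨m, hm, hjm, hh⟩
      simp only [pvHit, decide_eq_true_eq] at hh
      obtain ⟨w, hwQ, hwR⟩ := hh
      exact ⟨w, (PySem.Set.mem_ofList _ _).mpr hwR, (hidx' w j).mpr ⟨m, hm, hjm, hwQ⟩⟩
  have hnd : referenced.Nodup := by
    refine nodup_reffold _ _ _ ?_
    simp [PySem.Set.empty]
  -- the comparison list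
  set L : List Int := ((List.range turns.length).filter
      (fun m => pvHit R (turns.getD m []))).map Int.ofNat with hL
  have hndL : L.Nodup := by
    refine List.Nodup.map (fun a b h => Int.ofNat.inj h) ?_
    exact List.Nodup.filter _ List.nodup_range
  have hmemL : ∀ j : Int, j ∈ L
      ↔ ∃ m : Nat, m < turns.length ∧ j = (m : Int) ∧ pvHit R (turns.getD m []) = true := by
    intro j
    simp only [hL, List.mem_map, List.mem_filter, List.mem_range]
    constructor
    · rintro ⟨m, ⟨hm, hh⟩, rfl⟩; exact ⟨m, hm, by simp [Int.ofNat_eq_natCast], hh⟩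
    · rintro ⟨m, hm, rfl, hh⟩; exact ⟨m, ⟨hm, hh⟩, by simp [Int.ofNat_eq_natCast]⟩
  have hperm : referenced.Perm L := by
    rw [List.perm_ext_iff_of_nodup hnd hndL]
    intro j; rw [hmem j, hmemL j]
  have hlen : referenced.length = L.length := hperm.length_eq
  have : L.length = List.countP (pvHit R) turns := by
    rw [hL, List.length_map, countP_eq_filter_range (pvHit R) [] turns]

  simp only [PySem.Set.len]
  rw [hlen, this]

-- ===== VERDICT (by name: the statement is the Claim_ definition above) =====
theorem count_context_references_py_spec : Claim_equal_count_context_references_py := by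
  intro response previous_turns _
  unfold Spec_count_context_references_py
  rw [A_eq_countP, B_eq_countP]
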